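-- pv_equiv track=rewrite | github.com/LORDBurnItUp/Sovereign-Architect | dashboard_api.py | _match_agent_from_text
-- ===== SOURCE A (Python) =====
-- AGENT_NAME_ALIASES = {
--     "overlord": "Overlord", "agent zero": "Overlord", "agentzero": "Overlord", "zero": "Overlord",
--     "douglas": "Douglas", "hermes": "Hermes", "sentinel": "Sentinel",
--     "travis": "Travis", "aureus": "Aureus", "khan": "Khan",
--     "openclaw infra": "OpenClaw-Infra", "openclaw-infra": "OpenClaw-Infra",
--     "openclaw strategy": "OpenClaw-Strategy", "openclaw-strategy": "OpenClaw-Strategy",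
--     "lordsav": "OpenClaw-Infra", "gknowsthiz": "OpenClaw-Strategy",
-- }
--
-- def _match_agent_from_text(text: str):
--     """Return the canonical agent name whose alias appears FIRST in text (name-call logic)."""
--     low = text.lower()
--     best = None
--     best_idx = len(low) + 1
--     for alias, canon in AGENT_NAME_ALIASES.items():
--         idx = low.find(alias)
--         if idx >= 0 and idx < best_idx:
--             best_idx = idx
--             best = canon
--     return best
-- ===== SOURCE B (Python) =====
-- AGENT_NAME_ALIASES = {
--     "overlord": "Overlord", "agent zero": "Overlord", "agentzero": "Overlord", "zero": "Overlord",
--     "douglas": "Douglas", "hermes": "Hermes", "sentinel": "Sentinel",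
--     "travis": "Travis", "aureus": "Aureus", "khan": "Khan",
--     "openclaw infra": "OpenClaw-Infra", "openclaw-infra": "OpenClaw-Infra",
--     "openclaw strategy": "OpenClaw-Strategy", "openclaw-strategy": "OpenClaw-Strategy",
--     "lordsav": "OpenClaw-Infra", "gknowsthiz": "OpenClaw-Strategy",
-- }
--
-- def _match_agent_from_text(text: str):
--     """Left-to-right position scan: at the earliest position where any alias
--     starts, return that alias's canonical name (aliases tried in dict order,
--     matching A's strict-'<' tie-break); None if no alias occurs."""
--     low = text.lower()
--     for i in range(len(low)):
--         for alias, canon in AGENT_NAME_ALIASES.items():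
--             if low.startswith(alias, i):
--                 return canon
--     return None
-- ===== Notes on version B (the rewrite author's own statement) =====
-- stated objective: alternative
-- what changed: Instead of running str.find once per alias and keeping the minimum index with a strict-< tie-break, B scans text positions left to right and at each position tests the aliases in dict order with startswith, returning at the first match (= earliest occurrence, same tie-break) and None if the scan completes.
import Mathlib
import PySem

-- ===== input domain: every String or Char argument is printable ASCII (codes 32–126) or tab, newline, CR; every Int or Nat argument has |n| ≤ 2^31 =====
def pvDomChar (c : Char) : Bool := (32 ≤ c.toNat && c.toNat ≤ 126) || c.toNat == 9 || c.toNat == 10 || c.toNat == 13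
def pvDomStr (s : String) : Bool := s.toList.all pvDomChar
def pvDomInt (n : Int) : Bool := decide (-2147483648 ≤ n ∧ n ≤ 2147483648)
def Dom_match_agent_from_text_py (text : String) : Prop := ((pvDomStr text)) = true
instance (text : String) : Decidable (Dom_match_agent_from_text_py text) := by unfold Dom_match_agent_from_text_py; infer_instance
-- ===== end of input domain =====

-- B scans text positions left to right testing each alias with startswith, instead of
-- A's one str.find per alias with a running strict-< minimum; same result (alternative form).

-- AGENT_NAME_ALIASES.items(), in dict insertion order (shared data table)
def pvAliases : List (List Char × String) :=
  [("overlord".toList, "Overlord"), ("agent zero".toList, "Overlord"),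
   ("agentzero".toList, "Overlord"), ("zero".toList, "Overlord"),
   ("douglas".toList, "Douglas"), ("hermes".toList, "Hermes"),
   ("sentinel".toList, "Sentinel"), ("travis".toList, "Travis"),
   ("aureus".toList, "Aureus"), ("khan".toList, "Khan"),
   ("openclaw infra".toList, "OpenClaw-Infra"), ("openclaw-infra".toList, "OpenClaw-Infra"),
   ("openclaw strategy".toList, "OpenClaw-Strategy"), ("openclaw-strategy".toList, "OpenClaw-Strategy"),
   ("lordsav".toList, "OpenClaw-Infra"), ("gknowsthiz".toList, "OpenClaw-Strategy")]

-- ===== PORT A =====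
-- one loop iteration of A: update (best, best_idx) from low.find(alias)
def pvStep (low : List Char) (acc : Option String × Int) (p : List Char × String) :
    Option String × Int :=
  let idx := PySem.Chars.find low p.1
  if 0 ≤ idx ∧ idx < acc.2 then (some p.2, idx) else acc

def match_agent_from_text_py (text : String) : Option String :=
  let low := PySem.Chars.lower text.toList
  (pvAliases.foldl (pvStep low) ((none : Option String), (low.length : Int) + 1)).1

-- ===== PORT B =====
-- B's inner loop: first alias (dict order) with low.startswith(alias, i), on the suffix at i
def pvHit (suf : List Char) : Option String :=
  pvAliases.findSome? (fun p => if PySem.Chars.startswith suf p.1 then some p.2 else none)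

-- B's outer loop over positions i = structural recursion on the suffix of low
def pvScan : List Char → Option String
  | [] => none
  | c :: cs =>
    match pvHit (c :: cs) with
    | some r => some r
    | none => pvScan cs

def match_agent_from_text_py_alt (text : String) : Option String :=
  pvScan (PySem.Chars.lower text.toList)

-- ===== PRECONDITION & SPEC =====
def Spec_match_agent_from_text_py (text : String) (out : Option String) : Prop := out = match_agent_from_text_py_alt text
instance (text : String) (out : Option String) : Decidable (Spec_match_agent_from_text_py text out) := by unfold Spec_match_agent_from_text_py; infer_instance

-- ===== CLAIM (what is proved, stated in full; the proofs are below) =====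
def Claim_equal_match_agent_from_text_py : Prop := ∀ (text : String), Dom_match_agent_from_text_py text → Spec_match_agent_from_text_py text (match_agent_from_text_py text)

-- ===== LEMMAS AND PROOFS =====

-- general fact about findSome? (no Mathlib lemma found by exact?)
theorem pv_findSome?_congr {α β : Type} (l : List α) (f g : α → Option β)
    (h : ∀ a ∈ l, f a = g a) : l.findSome? f = l.findSome? g := by
  induction l with
  | nil => rfl
  | cons x xs ih =>
    simp only [List.findSome?_cons, h x (List.mem_cons_self)]
    cases g x with
    | some r => rfl
    | none => exact ih fun a ha => h a (List.mem_cons_of_mem x ha)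

-- A's fold never updates when every remaining find is -1 or ≥ the current best index
theorem pv_fold_keep (low : List Char) (ps : List (List Char × String))
    (b : Option String) (n : Int)
    (h : ∀ p ∈ ps, PySem.Chars.find low p.1 = -1 ∨ n ≤ PySem.Chars.find low p.1) :
    ps.foldl (pvStep low) (b, n) = (b, n) := by
  induction ps with
  | nil => rfl
  | cons p ps ih =>
    have hp := h p (List.mem_cons_self)
    have hstep : pvStep low (b, n) p = (b, n) := by
      simp only [pvStep]
      rw [if_neg]
      rcases hp with hp | hp <;> (intro ⟨h1, h2⟩; omega)
    rw [List.foldl_cons, hstep]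
    exact ih fun q hq => h q (List.mem_cons_of_mem p hq)

-- A's fold returns the first alias achieving the (global) minimum find index N,
-- whenever the current best index exceeds N and some remaining alias achieves N
theorem pv_fold_min (low : List Char) (N : Nat) :
    ∀ (ps : List (List Char × String)) (b : Option String) (n : Int),
    (∀ p ∈ ps, PySem.Chars.find low p.1 = -1 ∨ (N : Int) ≤ PySem.Chars.find low p.1) →
    (N : Int) < n →
    (∃ p ∈ ps, PySem.Chars.find low p.1 = (N : Int)) →
    (ps.foldl (pvStep low) (b, n)).1 =
      ps.findSome? (fun p => if PySem.Chars.find low p.1 = (N : Int) then some p.2 else none) := by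
  intro ps
  induction ps with
  | nil => intro b n _ _ hex; simp at hex
  | cons p ps ih =>
    intro b n hall hn hex
    have hp := hall p (List.mem_cons_self)
    by_cases hpe : PySem.Chars.find low p.1 = (N : Int)
    · -- head achieves the minimum: update, then the fold is stable
      have hstep : pvStep low (b, n) p = (some p.2, (N : Int)) := by
        simp only [pvStep]
        rw [if_pos ⟨by omega, by omega⟩, hpe]
      rw [List.foldl_cons, hstep,
        pv_fold_keep low ps (some p.2) (N : Int)
          (fun q hq => hall q (List.mem_cons_of_mem p hq))]
      simp [hpe]
    · -- head does not achieve the minimum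
      have hex' : ∃ q ∈ ps, PySem.Chars.find low q.1 = (N : Int) := by
        rcases hex with ⟨q, hq, hqe⟩
        rcases List.mem_cons.mp hq with rfl | hq'
        · exact absurd hqe hpe
        · exact ⟨q, hq', hqe⟩
      have hfS : List.findSome?
          (fun p => if PySem.Chars.find low p.1 = (N : Int) then some p.2 else none)
          (p :: ps) = List.findSome?
          (fun p => if PySem.Chars.find low p.1 = (N : Int) then some p.2 else none) ps := by
        simp [hpe]
      rw [List.foldl_cons, hfS]
      by_cases hup : 0 ≤ PySem.Chars.find low p.1 ∧ PySem.Chars.find low p.1 < n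
      · have hstep : pvStep low (b, n) p = (some p.2, PySem.Chars.find low p.1) := by
          simp only [pvStep]; rw [if_pos hup]
        rw [hstep]
        exact ih (some p.2) (PySem.Chars.find low p.1)
          (fun q hq => hall q (List.mem_cons_of_mem p hq))
          (by rcases hp with hp | hp <;> omega) hex'
      · have hstep : pvStep low (b, n) p = (b, n) := by
          simp only [pvStep]; rw [if_neg hup]
        rw [hstep]
        exact ih b n (fun q hq => hall q (List.mem_cons_of_mem p hq)) hn hex'

-- B returns none when no alias occurs anywhere in low
theorem pv_scan_none (low : List Char)
    (h : ∀ p ∈ pvAliases, ¬ p.1 <:+: low) : pvScan low = none := by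
  induction low with
  | nil => rfl
  | cons c cs ih =>
    have hhit : pvHit (c :: cs) = none := by
      rw [pvHit, List.findSome?_eq_none_iff]
      intro p hp
      rw [if_neg]
      intro hs
      exact h p hp ((PySem.Chars.startswith_iff _ _ |>.mp hs).isInfix)
    rw [pvScan, hhit]
    exact ih fun p hp hin =>
      h p hp (hin.trans (List.suffix_cons c cs).isInfix)

-- B returns the first alias matching at position m when no alias matches before m
theorem pv_scan_char (low : List Char) :
    ∀ (m : Nat) (r : String),
    (∀ i < m, pvHit (low.drop i) = none) → pvHit (low.drop m) = some r →
    pvScan low = some r := by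
  induction low with
  | nil =>
    intro m r _ habs
    have : pvHit (([] : List Char).drop m) = none := by
      rw [List.drop_nil]; decide
    rw [this] at habs; exact absurd habs (by simp)
  | cons c cs ih =>
    intro m r hbefore hm
    cases m with
    | zero =>
      rw [List.drop_zero] at hm
      rw [pvScan, hm]
    | succ m' =>
      have h0 : pvHit (c :: cs) = none := by
        have := hbefore 0 (Nat.succ_pos m')
        rwa [List.drop_zero] at this
      rw [pvScan, h0]
      exact ih m' r
        (fun i hi => by
          have := hbefore (i + 1) (by omega)
          rwa [List.drop_succ_cons] at this)
        (by rwa [List.drop_succ_cons] at hm)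

-- no alias in the table is empty
theorem pv_aliases_ne_nil (p : List Char × String) (hp : p ∈ pvAliases) : p.1 ≠ [] := by
  fin_cases hp <;> decide

-- A = B on every lowered character list
theorem pv_key (low : List Char) :
    (pvAliases.foldl (pvStep low) ((none : Option String), (low.length : Int) + 1)).1 =
      pvScan low := by
  by_cases hex : ∃ p ∈ pvAliases, p.1 <:+: low
  case neg =>
    -- no alias occurs: every find is -1, the fold keeps (none, len+1); the scan gives none
    push Not at hex
    rw [pv_fold_keep low pvAliases none ((low.length : Int) + 1)
      (fun p hp => Or.inl ((PySem.Chars.find_eq_neg_one_iff _ _).mpr (hex p hp))),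
      pv_scan_none low hex]
  case pos =>
    obtain ⟨p0, hp0, hinf0⟩ := hex
    have hQ : ∃ i, ∃ p ∈ pvAliases, p.1 <+: low.drop i := by
      obtain ⟨j, hj⟩ := (PySem.Chars.exists_prefix_drop_iff_isIn p0.1 low).mpr
        ((PySem.Chars.isIn_iff_infix _ _).mpr hinf0)
      exact ⟨j, p0, hp0, hj⟩
    set N := Nat.find hQ with hNdef
    have hQN : ∃ p ∈ pvAliases, p.1 <+: low.drop N := Nat.find_spec hQ
    have hmin : ∀ i < N, ¬ ∃ p ∈ pvAliases, p.1 <+: low.drop i :=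
      fun i hi => Nat.find_min hQ hi
    -- at the earliest matching position N, "alias starts here" ↔ "find low alias = N"
    have F : ∀ p ∈ pvAliases, (p.1 <+: low.drop N ↔ PySem.Chars.find low p.1 = (N : Int)) := by
      intro p hp
      constructor
      · intro hpre
        have hin : p.1 <:+: low := hpre.isInfix.trans (List.drop_suffix N low).isInfix
        have hf0 : 0 ≤ PySem.Chars.find low p.1 := (PySem.Chars.find_nonneg_iff _ _).mpr hin
        obtain ⟨hfp, hfmin⟩ := PySem.Chars.find_spec hf0
        have h1 : N ≤ (PySem.Chars.find low p.1).toNat := Nat.find_min' hQ ⟨p, hp, hfp⟩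
        have h2 : ¬ N < (PySem.Chars.find low p.1).toNat := fun h => hfmin N h hpre
        omega
      · intro hf
        have hf0 : 0 ≤ PySem.Chars.find low p.1 := by omega
        obtain ⟨hfp, -⟩ := PySem.Chars.find_spec hf0
        have ht : (PySem.Chars.find low p.1).toNat = N := by omega
        rwa [ht] at hfp
    have hex_find : ∃ p ∈ pvAliases, PySem.Chars.find low p.1 = (N : Int) := by
      obtain ⟨p, hp, hpre⟩ := hQN
      exact ⟨p, hp, (F p hp).mp hpre⟩
    have hNlt : (N : Int) < (low.length : Int) + 1 := by
      obtain ⟨p, hp, hpre⟩ := hQN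
      have hne : p.1 ≠ [] := pv_aliases_ne_nil p hp
      have hdrop : low.drop N ≠ [] := fun h => hne (List.prefix_nil.mp (h ▸ hpre))
      have : N < low.length := by
        by_contra h
        exact hdrop (List.drop_eq_nil_iff.mpr (by omega))
      omega
    have hall : ∀ p ∈ pvAliases,
        PySem.Chars.find low p.1 = -1 ∨ (N : Int) ≤ PySem.Chars.find low p.1 := by
      intro p hp
      by_cases hin : p.1 <:+: low
      · have hf0 : 0 ≤ PySem.Chars.find low p.1 := (PySem.Chars.find_nonneg_iff _ _).mpr hin
        obtain ⟨hfp, -⟩ := PySem.Chars.find_spec hf0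
        have : N ≤ (PySem.Chars.find low p.1).toNat := Nat.find_min' hQ ⟨p, hp, hfp⟩
        omega
      · exact Or.inl ((PySem.Chars.find_eq_neg_one_iff _ _).mpr hin)
    rw [pv_fold_min low N pvAliases none ((low.length : Int) + 1) hall hNlt hex_find]
    -- the two inner loops agree pointwise at position N
    have hhitN : pvHit (low.drop N) = pvAliases.findSome?
        (fun p => if PySem.Chars.find low p.1 = (N : Int) then some p.2 else none) := by
      refine pv_findSome?_congr pvAliases _ _ (fun p hp => ?_)
      by_cases hpre : p.1 <+: low.drop N
      · rw [if_pos ((PySem.Chars.startswith_iff _ _).mpr hpre), if_pos ((F p hp).mp hpre)]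
      · rw [if_neg (fun hs => hpre ((PySem.Chars.startswith_iff _ _).mp hs)),
          if_neg (fun hf => hpre ((F p hp).mpr hf))]
    cases hfs : pvAliases.findSome?
        (fun p => if PySem.Chars.find low p.1 = (N : Int) then some p.2 else none) with
    | none =>
      rw [List.findSome?_eq_none_iff] at hfs
      obtain ⟨p, hp, hpe⟩ := hex_find
      have := hfs p hp
      rw [if_pos hpe] at this
      exact absurd this (by simp)
    | some r =>
      have hbefore : ∀ i < N, pvHit (low.drop i) = none := by
        intro i hi
        rw [pvHit, List.findSome?_eq_none_iff]
        intro p hp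
        rw [if_neg]
        intro hs
        exact hmin i hi ⟨p, hp, (PySem.Chars.startswith_iff _ _).mp hs⟩
      rw [pv_scan_char low N r hbefore (by rw [hhitN, hfs])]

-- ===== VERDICT (by name: the statement is the Claim_ definition above) =====
theorem match_agent_from_text_py_spec : Claim_equal_match_agent_from_text_py := by
  intro text _
  unfold Spec_match_agent_from_text_py match_agent_from_text_py match_agent_from_text_py_alt
  exact pv_key (PySem.Chars.lower text.toList)
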